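-- pv_equiv track=rewrite | github.com/wald16/Algo-1 | Practicas/guia7.py | vocals
-- ===== SOURCE A (Python) =====
-- def vocals(palabra: str) -> bool:
--     palabra = palabra.lower()
--     vocales = set()
--     for letra in palabra:
--         if letra in "aeiou":
--             vocales.add(letra)
--     if len(vocales) >= 3:
--         return True
--     return False
-- ===== SOURCE B (Python) =====
-- def vocals(palabra: str) -> bool:
--     palabra = palabra.lower()
--     return sum(1 for v in "aeiou" if v in palabra) >= 3
-- ===== Notes on version B (the rewrite author's own statement) =====
-- stated objective: idiomatic
-- what changed: B iterates over the five-vowel alphabet and counts which vowels occur in the lowercased word via substring membership, instead of scanning the word and accumulating a set of seen vowels.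
import Mathlib
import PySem

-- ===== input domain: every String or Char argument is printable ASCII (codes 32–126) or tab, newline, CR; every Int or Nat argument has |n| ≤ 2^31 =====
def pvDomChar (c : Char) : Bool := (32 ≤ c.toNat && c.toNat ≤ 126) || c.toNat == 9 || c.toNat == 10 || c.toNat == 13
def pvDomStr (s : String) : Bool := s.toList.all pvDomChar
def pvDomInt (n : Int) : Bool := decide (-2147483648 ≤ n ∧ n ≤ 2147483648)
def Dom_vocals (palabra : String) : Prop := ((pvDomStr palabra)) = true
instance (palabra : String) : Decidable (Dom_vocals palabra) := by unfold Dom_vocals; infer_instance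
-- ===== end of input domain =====

-- B iterates over the five-vowel alphabet and counts which vowels occur in the
-- lowercased word (idiomatic decomposition), instead of A's scan of the word accumulating a set.

-- ===== PORT A =====
def vocals (palabra : String) : Bool :=
  let p := PySem.Str.lower palabra
  let vocales : PySem.Set Char :=
    p.toList.foldl
      (fun vocales letra =>
        if ("aeiou".toList).contains letra then PySem.Set.add vocales letra else vocales)
      PySem.Set.empty
  if PySem.Set.len vocales ≥ 3 then true else false

-- ===== PORT B =====
def vocals_alt (palabra : String) : Bool :=
  let p := PySem.Str.lower palabra
  decide (("aeiou".toList).foldl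
      (fun n v => if p.toList.contains v then n + 1 else n) (0 : Int) ≥ 3)

-- ===== PRECONDITION & SPEC =====
def Spec_vocals (palabra : String) (out : Bool) : Prop := out = vocals_alt palabra
instance (palabra : String) (out : Bool) : Decidable (Spec_vocals palabra out) := by unfold Spec_vocals; infer_instance

-- ===== CLAIM (what is proved, stated in full; the proofs are below) =====
def Claim_equal_vocals : Prop := ∀ (palabra : String), Dom_vocals palabra → Spec_vocals palabra (vocals palabra)

-- ===== LEMMAS AND PROOFS =====

lemma foldA_mem (l : List Char) (s : PySem.Set Char) (x : Char) :
    (x ∈ l.foldl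
        (fun vocales letra =>
          if ("aeiou".toList).contains letra then PySem.Set.add vocales letra else vocales) s) ↔
      x ∈ s ∨ (("aeiou".toList).contains x ∧ x ∈ l) := by
  induction l generalizing s with
  | nil => simp
  | cons c t ih =>
    simp only [List.foldl_cons, ih]
    by_cases h : ("aeiou".toList).contains c
    · simp only [h, if_pos, PySem.Set.mem_add, List.mem_cons]
      constructor
      · rintro ((hs | rfl) | ⟨hv, ht⟩)
        · exact Or.inl hs
        · exact Or.inr ⟨h, Or.inl rfl⟩
        · exact Or.inr ⟨hv, Or.inr ht⟩
      · rintro (hs | ⟨hv, rfl | ht⟩)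
        · exact Or.inl (Or.inl hs)
        · exact Or.inl (Or.inr rfl)
        · exact Or.inr ⟨hv, ht⟩
    · simp only [h, List.mem_cons, Bool.false_eq_true]
      constructor
      · rintro (hs | ⟨hv, ht⟩)
        · exact Or.inl hs
        · exact Or.inr ⟨hv, Or.inr ht⟩
      · rintro (hs | ⟨hv, rfl | ht⟩)
        · exact Or.inl hs
        · exact absurd hv h
        · exact Or.inr ⟨hv, ht⟩

lemma foldA_nodup (l : List Char) (s : PySem.Set Char) (hs : s.Nodup) :
    (l.foldl
        (fun vocales letra =>
          if ("aeiou".toList).contains letra then PySem.Set.add vocales letra else vocales)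
        s).Nodup := by
  induction l generalizing s with
  | nil => exact hs
  | cons c t ih =>
    simp only [List.foldl_cons]
    by_cases h : ("aeiou".toList).contains c
    · simp only [h, if_pos]
      exact ih _ (PySem.Set.nodup_add s c hs)
    · simp only [h, Bool.false_eq_true]
      exact ih _ hs

lemma foldA_length (l : List Char) :
    (l.foldl
        (fun vocales letra =>
          if ("aeiou".toList).contains letra then PySem.Set.add vocales letra else vocales)
        PySem.Set.empty).length
      = ("aeiou".toList).countP (fun v => l.contains v) := by
  set S := l.foldl
      (fun vocales letra =>
        if ("aeiou".toList).contains letra then PySem.Set.add vocales letra else vocales)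
      PySem.Set.empty with hS
  have hnodup : S.Nodup := foldA_nodup l PySem.Set.empty (by simp [PySem.Set.empty])
  have hperm : S.Perm (("aeiou".toList).filter (fun v => l.contains v)) := by
    rw [List.perm_ext_iff_of_nodup hnodup (List.Nodup.filter _ (by decide))]
    intro a
    rw [hS, foldA_mem]
    simp only [PySem.Set.empty, List.not_mem_nil, false_or, List.mem_filter,
      List.contains_iff_mem]
  rw [hperm.length_eq, List.countP_eq_length_filter]

theorem vocals_spec_aux (palabra : String) : vocals palabra = vocals_alt palabra := by
  unfold vocals vocals_alt
  simp only [PySem.List.foldl_if_add_one, foldA_length, PySem.Set.len, ge_iff_le, zero_add]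
  split_ifs with h
  · exact (decide_eq_true h).symm
  · exact (decide_eq_false h).symm

-- ===== VERDICT (by name: the statement is the Claim_ definition above) =====
theorem vocals_spec : Claim_equal_vocals := by
  intro palabra _
  exact vocals_spec_aux palabra
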